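-- pv_equiv track=rewrite | github.com/Semeriuss/A2SV-Labs | 44. k_dominant.py | minKDominant
-- ===== SOURCE A (Python) =====
-- def minKDominant(listOfChars):
--
--     k = float("inf")
--     n = len(listOfChars)
--
--     for i in range(26):
--         letter = chr(ord('a') + i)
--         start = end = currentK = 0
--         while end < n:
--             if letter == listOfChars[end]:
--                 currentK = max(currentK, end - start + 1)
--                 start = end
--             end += 1
--         currentK = max(currentK, end - start)
--         k = min(currentK, k)
--     return k
-- ===== SOURCE B (Python) =====
-- def minKDominant(listOfChars):
--     n = len(listOfChars)
--     # one pass: positions of each element value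
--     pos = {}
--     for i, c in enumerate(listOfChars):
--         pos.setdefault(c, []).append(i)
--     vals = []
--     for j in range(26):
--         c = chr(ord('a') + j)
--         p = pos.get(c, [])
--         if not p:
--             vals.append(n)
--         else:
--             m = max(p[0] + 1, n - p[-1])
--             for x, y in zip(p, p[1:]):
--                 m = max(m, y - x + 1)
--             vals.append(m)
--     return min(vals)
-- ===== Notes on version B (the rewrite author's own statement) =====
-- stated objective: faster
-- what changed: B replaces A's 26 full sliding scans of the list by one pass that builds a value-to-positions index, then computes each letter's max gap directly from its (short) position list and returns the min over the 26 letters.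
import Mathlib
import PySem

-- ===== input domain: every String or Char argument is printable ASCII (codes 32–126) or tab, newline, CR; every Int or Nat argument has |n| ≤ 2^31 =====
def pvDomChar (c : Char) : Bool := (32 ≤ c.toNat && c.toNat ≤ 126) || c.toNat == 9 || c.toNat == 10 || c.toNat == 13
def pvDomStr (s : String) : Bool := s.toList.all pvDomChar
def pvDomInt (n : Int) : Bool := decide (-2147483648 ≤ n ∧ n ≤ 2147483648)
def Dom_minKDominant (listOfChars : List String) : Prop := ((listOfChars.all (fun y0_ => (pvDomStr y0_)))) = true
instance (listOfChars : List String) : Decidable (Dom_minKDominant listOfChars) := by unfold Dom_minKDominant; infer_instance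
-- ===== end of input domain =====

-- B builds one index table (value -> occurrence positions) in a single pass and takes the
-- min over the 26 letters of the max gap computed from each letter's position list,
-- replacing A's 26 full scans of the input list; same return value on every input.

-- ===== PORT A =====
-- 26 sliding scans; Python's k starts as float("inf") and is always replaced on the first
-- of the 26 iterations, modelled as `Option Int` (`.getD 0` is unreachable: range 26 ≠ []).
def minKDominant (listOfChars : List String) : Int :=
  let n : Int := listOfChars.length
  let k : Option Int := (List.range 26).foldl (fun k i =>
    let letter : String := String.ofList [Char.ofNat ('a'.toNat + i)]
    let sc := (PySem.List.enumerate listOfChars 0).foldl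
      (fun (sc : Int × Int) (p : Int × String) =>
        if letter = p.2 then (p.1, max sc.2 (p.1 - sc.1 + 1)) else sc)
      (0, 0)
    let currentK := max sc.2 (n - sc.1)
    some (match k with | none => currentK | some v => min currentK v)) none
  k.getD 0

-- ===== PORT B =====
def minKDominant_alt (listOfChars : List String) : Int :=
  let n : Int := listOfChars.length
  let pos : PySem.Dict String (List Int) := (PySem.List.enumerate listOfChars 0).foldl
    (fun d p => d.insert p.2 (d.getD p.2 [] ++ [p.1])) PySem.Dict.empty
  let vals : List Int := (List.range 26).map (fun j =>
    let c : String := String.ofList [Char.ofNat ('a'.toNat + j)]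
    match pos.getD c [] with
    | [] => n
    | p0 :: rest =>
      let m := max (p0 + 1) (n - (p0 :: rest).getLast (by simp))
      (List.zip (p0 :: rest) rest).foldl (fun a pr => max a (pr.2 - pr.1 + 1)) m)
  (PySem.List.min? vals (fun y => y)).getD 0

-- ===== PRECONDITION & SPEC =====
def Spec_minKDominant (listOfChars : List String) (out : Int) : Prop := out = minKDominant_alt listOfChars
instance (listOfChars : List String) (out : Int) : Decidable (Spec_minKDominant listOfChars out) := by unfold Spec_minKDominant; infer_instance

-- ===== CLAIM (what is proved, stated in full; the proofs are below) =====
def Claim_equal_minKDominant : Prop := ∀ (listOfChars : List String), Dom_minKDominant listOfChars → Spec_minKDominant listOfChars (minKDominant listOfChars)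

-- ===== LEMMAS AND PROOFS =====

-- positions (as Int) at which the value `c` occurs, indices starting at i
def posC (c : String) : Int → List String → List Int
  | _, [] => []
  | i, x :: xs => if c = x then i :: posC c (i + 1) xs else posC c (i + 1) xs

-- A's inner sliding state replayed on the position list alone
def gm : Int × Int → List Int → Int × Int
  | sc, [] => sc
  | (s, cur), p :: ps => gm (p, max cur (p - s + 1)) ps

-- per-letter value of B, as a standalone function of the position list
def valB (n : Int) : List Int → Int
  | [] => n
  | p0 :: rest =>
    (List.zip (p0 :: rest) rest).foldl (fun a pr => max a (pr.2 - pr.1 + 1))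
      (max (p0 + 1) (n - (p0 :: rest).getLast (by simp)))

lemma innerA_eq_gm (c : String) :
    ∀ (l : List String) (i s cur : Int),
      (PySem.List.enumerate l i).foldl
        (fun (sc : Int × Int) (p : Int × String) =>
          if c = p.2 then (p.1, max sc.2 (p.1 - sc.1 + 1)) else sc) (s, cur)
      = gm (s, cur) (posC c i l) := by
  intro l
  induction l with
  | nil => intro i s cur; simp [PySem.List.enumerate_nil, posC, gm]
  | cons x xs ih =>
    intro i s cur
    simp only [PySem.List.enumerate_cons, List.foldl_cons, posC]
    by_cases h : c = x
    · subst h; simp [gm, ih]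
    · simp [h, ih]

lemma gm_char : ∀ (ps : List Int) (s cur : Int),
    gm (s, cur) ps
      = ((s :: ps).getLast (by simp),
         (List.zip (s :: ps) ps).foldl (fun a pr => max a (pr.2 - pr.1 + 1)) cur) := by
  intro ps
  induction ps with
  | nil => intro s cur; simp [gm]
  | cons p ps ih =>
    intro s cur
    simp only [gm, ih p (max cur (p - s + 1)), List.zip_cons_cons, List.foldl_cons]
    simp [List.getLast_cons]

lemma fmax_max_init (l : List (Int × Int)) :
    ∀ (a b : Int),
      l.foldl (fun a pr => max a (pr.2 - pr.1 + 1)) (max a b)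
        = max a (l.foldl (fun a pr => max a (pr.2 - pr.1 + 1)) b) := by
  induction l with
  | nil => intro a b; simp
  | cons x l ih =>
    intro a b
    simp only [List.foldl_cons, max_assoc, ih]

lemma posC_ge (c : String) : ∀ (l : List String) (i q : Int), q ∈ posC c i l → i ≤ q := by
  intro l
  induction l with
  | nil => intro i q h; simp [posC] at h
  | cons x xs ih =>
    intro i q h
    simp only [posC] at h
    by_cases hc : c = x
    · subst hc
      simp at h
      rcases h with h | h
      · omega
      · have := ih (i + 1) q h; omega
    · simp [hc] at h
      have := ih (i + 1) q h; omega

-- A's per-letter value equals B's, on the position list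
lemma perLetter (xs : List String) (c : String) :
    max ((PySem.List.enumerate xs 0).foldl
        (fun (sc : Int × Int) (p : Int × String) =>
          if c = p.2 then (p.1, max sc.2 (p.1 - sc.1 + 1)) else sc) (0, 0)).2
      ((xs.length : Int) -
        ((PySem.List.enumerate xs 0).foldl
          (fun (sc : Int × Int) (p : Int × String) =>
            if c = p.2 then (p.1, max sc.2 (p.1 - sc.1 + 1)) else sc) (0, 0)).1)
      = valB (xs.length : Int) (posC c 0 xs) := by
  rw [innerA_eq_gm c xs 0 0 0]
  cases hp : posC c 0 xs with
  | nil => simp [gm, valB]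
  | cons p0 rest =>
    have hp0 : (0 : Int) ≤ p0 := posC_ge c xs 0 p0 (by rw [hp]; exact List.mem_cons_self ..)
    rw [gm_char]
    simp only [valB, List.zip_cons_cons, List.foldl_cons]
    have h1 : max (0 : Int) (p0 - 0 + 1) = p0 + 1 := by omega
    rw [h1]
    rw [max_comm (p0 + 1) ((xs.length : Int) - (p0 :: rest).getLast (by simp))]
    rw [fmax_max_init]
    exact max_comm _ _

-- dict of position lists built by B = posC, key by key
lemma build_getD (c : String) :
    ∀ (l : List String) (d : PySem.Dict String (List Int)) (i : Int),
      ((PySem.List.enumerate l i).foldl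
          (fun d (p : Int × String) => d.insert p.2 (d.getD p.2 [] ++ [p.1])) d).getD c []
        = d.getD c [] ++ posC c i l := by
  intro l
  induction l with
  | nil => intro d i; simp [PySem.List.enumerate_nil, posC]
  | cons x xs ih =>
    intro d i
    simp only [PySem.List.enumerate_cons, List.foldl_cons, posC, ih]
    by_cases h : c = x
    · subst h
      rw [PySem.Dict.getD_insert]
      simp
    · rw [PySem.Dict.getD_insert]
      simp [h]

lemma optmin_fold (f : Nat → Int) :
    ∀ (l : List Nat) (v : Int),
      l.foldl (fun (k : Option Int) i =>
        some (match k with | none => f i | some w => min (f i) w)) (some v)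
        = some ((l.map f).foldl min v) := by
  intro l
  induction l with
  | nil => intro v; simp
  | cons x l ih =>
    intro v
    simp only [List.foldl_cons, List.map_cons]
    rw [ih, min_comm (f x) v]

-- ===== VERDICT (by name: the statement is the Claim_ definition above) =====
theorem minKDominant_spec : Claim_equal_minKDominant := by
  intro xs _
  show minKDominant xs = minKDominant_alt xs
  simp only [minKDominant, minKDominant_alt]
  have hB : (fun (j : Nat) =>
      let c : String := String.ofList [Char.ofNat ('a'.toNat + j)]
      match ((PySem.List.enumerate xs 0).foldl
          (fun d (p : Int × String) => d.insert p.2 (d.getD p.2 [] ++ [p.1]))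
          PySem.Dict.empty).getD c [] with
      | [] => (xs.length : Int)
      | p0 :: rest =>
        let m := max (p0 + 1) ((xs.length : Int) - (p0 :: rest).getLast (by simp))
        (List.zip (p0 :: rest) rest).foldl (fun a pr => max a (pr.2 - pr.1 + 1)) m)
      = (fun (j : Nat) =>
          valB (xs.length : Int) (posC (String.ofList [Char.ofNat ('a'.toNat + j)]) 0 xs)) := by
    funext j
    dsimp only
    rw [build_getD _ xs PySem.Dict.empty 0]
    simp only [PySem.Dict.getD_empty, List.nil_append]
    cases posC (String.ofList [Char.ofNat ('a'.toNat + j)]) 0 xs with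
    | nil => rfl
    | cons p0 rest => rfl
  rw [hB]
  have hA : (fun (k : Option Int) (i : Nat) =>
      let letter : String := String.ofList [Char.ofNat ('a'.toNat + i)]
      let sc := (PySem.List.enumerate xs 0).foldl
        (fun (sc : Int × Int) (p : Int × String) =>
          if letter = p.2 then (p.1, max sc.2 (p.1 - sc.1 + 1)) else sc) (0, 0)
      let currentK := max sc.2 ((xs.length : Int) - sc.1)
      some (match k with | none => currentK | some v => min currentK v))
      = (fun (k : Option Int) (i : Nat) =>
          some (match k with
            | none => valB (xs.length : Int) (posC (String.ofList [Char.ofNat ('a'.toNat + i)]) 0 xs)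
            | some w => min (valB (xs.length : Int) (posC (String.ofList [Char.ofNat ('a'.toNat + i)]) 0 xs)) w)) := by
    funext k i
    dsimp only
    simp only [perLetter xs]
  rw [hA]
  have h26 : List.range 26 = 0 :: (List.range 25).map Nat.succ := by decide
  rw [h26]
  simp only [List.foldl_cons, List.map_cons]
  rw [optmin_fold]
  rw [PySem.List.min?_id_cons]
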